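-- pv_equiv track=rewrite | github.com/drisspg/lit-gpt | finetune/mine.py | get_max_seq_length
-- ===== SOURCE A (Python) =====
-- from typing import Optional, List, Tuple, Dict
--
-- override_max_seq_length = None
--
-- def get_max_seq_length(data: List[Dict]) -> Tuple[int, int, int]:
--     # find out the minimum max_seq_length required during fine-tuning (saves memory!)
--     lengths = [len(d["input_ids"]) for d in data]
--     max_seq_length = max(lengths)
--     longest_seq_ix = lengths.index(max_seq_length)
--     # support easy override at the top of the file
--     return (
--         override_max_seq_length if isinstance(override_max_seq_length, int) else max_seq_length,
--         max_seq_length,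
--         longest_seq_ix,
--     )
-- ===== SOURCE B (Python) =====
-- from typing import Optional, List, Tuple, Dict
--
-- override_max_seq_length = None
--
-- def get_max_seq_length(data: List[Dict]) -> Tuple[int, int, int]:
--     # single pass: track the best length and its first index while enumerating
--     best_len = -1
--     best_ix = -1
--     for ix, d in enumerate(data):
--         n = len(d["input_ids"])
--         if n > best_len:
--             best_len = n
--             best_ix = ix
--     if best_ix < 0:
--         raise ValueError("max() arg is an empty sequence")
--     return (
--         override_max_seq_length if isinstance(override_max_seq_length, int) else best_len,
--         best_len,
--         best_ix,
--     )
-- ===== Notes on version B (the rewrite author's own statement) =====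
-- stated objective: alternative
-- what changed: Replaces A's three passes (length comprehension, max(), list.index()) with one fold over enumerate(data) that maintains the best length and its first index, updating only on strict improvement.
-- outside the precondition, e.g. on get_max_seq_length([]): A raises ValueError, B raises ValueError; on get_max_seq_length([{'x': []}]): A raises KeyError, B raises KeyError
import Mathlib
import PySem

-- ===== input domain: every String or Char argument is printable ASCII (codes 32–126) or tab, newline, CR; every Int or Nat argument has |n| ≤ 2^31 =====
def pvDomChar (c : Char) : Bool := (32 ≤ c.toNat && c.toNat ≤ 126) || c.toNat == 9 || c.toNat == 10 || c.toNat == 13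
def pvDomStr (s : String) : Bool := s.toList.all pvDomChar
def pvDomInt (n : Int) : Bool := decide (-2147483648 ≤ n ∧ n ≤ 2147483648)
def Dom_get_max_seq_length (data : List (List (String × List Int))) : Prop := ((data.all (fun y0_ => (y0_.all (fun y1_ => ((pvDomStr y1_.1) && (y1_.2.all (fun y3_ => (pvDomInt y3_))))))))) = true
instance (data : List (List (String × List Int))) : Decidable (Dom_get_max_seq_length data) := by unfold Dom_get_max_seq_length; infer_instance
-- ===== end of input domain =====

-- B replaces A's three passes (comprehension, max, index) with one fold over enumerate keeping the
-- first-occurring maximum; same cost, different decomposition. module-level override_max_seq_length is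
-- None, so isinstance(..., int) is False and the first tuple component is max_seq_length in both.

-- ===== PORT A =====
-- d["input_ids"]: first match in the association list; Pre_ requires the key present (else KeyError).
def pvLookup (d : List (String × List Int)) : List Int :=
  (List.lookup "input_ids" d).getD []

def get_max_seq_length (data : List (List (String × List Int))) : Int × Int × Int :=
  let lengths : List Int := data.map (fun d => ((pvLookup d).length : Int))
  let max_seq_length : Int := (PySem.List.max? lengths (fun x => x)).getD 0
  let longest_seq_ix : Int := ((PySem.List.index? lengths max_seq_length).getD 0 : Nat)
  (max_seq_length, max_seq_length, longest_seq_ix)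

-- ===== PORT B =====
def get_max_seq_length_alt (data : List (List (String × List Int))) : Int × Int × Int :=
  let r : Int × Int :=
    (PySem.List.enumerate data 0).foldl
      (fun (acc : Int × Int) p =>
        let n : Int := ((pvLookup p.2).length : Int)
        if n > acc.1 then (n, p.1) else acc)
      (-1, -1)
  (r.1, r.1, r.2)

-- ===== PRECONDITION & SPEC =====
-- Pre_ excludes exactly the inputs on which Python A raises: empty data (ValueError from max([]))
-- and a record without the "input_ids" key (KeyError); B raises on the same inputs.
def Pre_get_max_seq_length (data : List (List (String × List Int))) : Prop :=
  data ≠ [] ∧ ∀ d ∈ data, (List.lookup "input_ids" d).isSome = true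
instance (data : List (List (String × List Int))) : Decidable (Pre_get_max_seq_length data) := by
  unfold Pre_get_max_seq_length; infer_instance

def pvWitness_get_max_seq_length : (List (List (String × List Int))) :=
  [[("input_ids", [1, 2])], [("input_ids", [3])]]

def Spec_get_max_seq_length (data : List (List (String × List Int))) (out : Int × Int × Int) : Prop := out = get_max_seq_length_alt data
instance (data : List (List (String × List Int))) (out : Int × Int × Int) : Decidable (Spec_get_max_seq_length data out) := by unfold Spec_get_max_seq_length; infer_instance

-- ===== CLAIM (what is proved, stated in full; the proofs are below) =====
def Claim_equal_get_max_seq_length : Prop := ∀ (data : List (List (String × List Int))), Dom_get_max_seq_length data → Pre_get_max_seq_length data → Spec_get_max_seq_length data (get_max_seq_length data)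

-- ===== LEMMAS AND PROOFS =====

-- max value and its first index of a list, computed by structural recursion (proof vehicle only)
def maxFirst : List Int → Option (Int × Nat)
  | [] => none
  | y :: t =>
    match maxFirst t with
    | none => some (y, 0)
    | some (m, i) => if m > y then some (m, i + 1) else some (y, 0)

lemma maxFirst_isSome : ∀ (l : List Int), l ≠ [] → ∃ m i, maxFirst l = some (m, i) := by
  intro l hne
  cases l with
  | nil => exact absurd rfl hne
  | cons y t =>
    simp only [maxFirst]
    rcases ht : maxFirst t with _ | ⟨m, i⟩
    · exact ⟨y, 0, rfl⟩
    · by_cases hc : m > y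
      · exact ⟨m, i + 1, by simp [hc]⟩
      · exact ⟨y, 0, by simp [hc]⟩

lemma maxFirst_spec : ∀ (l : List Int) (m : Int) (i : Nat),
    maxFirst l = some (m, i) →
    m ∈ l ∧ (∀ y ∈ l, y ≤ m) ∧ PySem.List.index? l m = some i := by
  intro l
  induction l with
  | nil => intro m i h; simp [maxFirst] at h
  | cons y t ih =>
    intro m i h
    rcases ht : maxFirst t with _ | ⟨m', i'⟩ <;> simp only [maxFirst, ht] at h
    · have ht' : t = [] := by
        by_contra hne
        obtain ⟨a, b, hab⟩ := maxFirst_isSome t hne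
        rw [hab] at ht; cases ht
      subst ht'
      obtain ⟨rfl, rfl⟩ := h
      exact ⟨by simp, by simp, PySem.List.index?_cons_self y []⟩
    · obtain ⟨hm, hb, hidx⟩ := ih m' i' ht
      by_cases hc : m' > y <;> simp only [hc, if_pos] at h
      · obtain ⟨rfl, rfl⟩ := h
        refine ⟨List.mem_cons_of_mem y hm, ?_, ?_⟩
        · intro z hz
          rcases List.mem_cons.mp hz with rfl | hz
          · omega
          · exact hb z hz
        · rw [PySem.List.index?_cons_of_ne t (by omega), hidx]; rfl
      · obtain ⟨rfl, rfl⟩ := h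
        refine ⟨List.mem_cons_self, ?_, PySem.List.index?_cons_self y t⟩
        intro z hz
        rcases List.mem_cons.mp hz with rfl | hz
        · exact le_refl z
        · have := hb z hz; omega

-- B's fold over an enumerated suffix, fully characterised by maxFirst
lemma foldB_spec : ∀ (t : List Int) (x j k : Int),
    (PySem.List.enumerate t k).foldl
      (fun (acc : Int × Int) p => if p.2 > acc.1 then (p.2, p.1) else acc) (x, j) =
    (match maxFirst t with
     | none => (x, j)
     | some (m, i) => if m > x then (m, k + (i : Int)) else (x, j)) := by
  intro t
  induction t with
  | nil => intro x j k; simp [maxFirst, PySem.List.enumerate_nil]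
  | cons y t ih =>
    intro x j k
    rw [PySem.List.enumerate_cons, List.foldl_cons]
    rcases ht : maxFirst t with _ | ⟨m, i⟩ <;> simp only [maxFirst, ht]
    · by_cases hy : y > x <;> simp only [hy, ite_true, ite_false] <;> rw [ih] <;> simp only [ht] <;> simp
    · by_cases hy : y > x <;> simp only [hy, ite_true, ite_false] <;> rw [ih] <;> simp only [ht]
      · by_cases hc : m > y
        · have hmx : m > x := by omega
          simp only [hc, hmx, ite_true, Prod.mk.injEq]
          refine ⟨trivial, by push_cast; omega⟩
        · have hmy : ¬ m > y := hc
          simp [hmy, hy]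
      · by_cases hc : m > y
        · by_cases hmx : m > x
          · simp only [hc, hmx, ite_true, Prod.mk.injEq]
            refine ⟨trivial, by push_cast; omega⟩
          · simp [hc, hmx]
        · have hyx : ¬ y > x := hy
          have hmx : ¬ m > x := by omega
          simp [hc, hyx, hmx]

-- enumerate commutes with map (bridges B's fold over data to a fold over the lengths list)
lemma enumerate_map {α β : Type} (f : α → β) : ∀ (xs : List α) (s : Int),
    PySem.List.enumerate (xs.map f) s =
      (PySem.List.enumerate xs s).map (fun p => (p.1, f p.2)) := by
  intro xs
  induction xs with
  | nil => intro s; simp [PySem.List.enumerate_nil]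
  | cons x t ih => intro s; simp [PySem.List.enumerate_cons, ih]

-- A's (max, max, first index) equals B's fold result, for a nonempty list of nonnegative ints
lemma combined_spec (l : List Int) (hne : l ≠ []) (hpos : ∀ y ∈ l, 0 ≤ y) :
    (((PySem.List.max? l (fun x => x)).getD 0 : Int),
     ((PySem.List.max? l (fun x => x)).getD 0 : Int),
     (((PySem.List.index? l ((PySem.List.max? l (fun x => x)).getD 0)).getD 0 : Nat) : Int)) =
    (let r : Int × Int := (PySem.List.enumerate l 0).foldl
        (fun (acc : Int × Int) p => if p.2 > acc.1 then (p.2, p.1) else acc) (-1, -1)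
     (r.1, r.1, r.2)) := by
  obtain ⟨m, i, hmf⟩ := maxFirst_isSome l hne
  obtain ⟨hmem, hmax, hidx⟩ := maxFirst_spec l m i hmf
  have hm0 : 0 ≤ m := hpos m hmem
  have hAmax : PySem.List.max? l (fun x => x) = some m := by
    rcases hA : PySem.List.max? l (fun x => x) with _ | m0
    · exact absurd ((PySem.List.max?_eq_none_iff l _).mp hA) hne
    · have h1 := PySem.List.max?_mem hA
      have h2 := PySem.List.max?_isMax hA m hmem
      have h3 := hmax m0 h1
      simp only [Option.some.injEq]
      omega
  rw [foldB_spec l (-1) (-1) 0, hmf]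
  have hgt : m > -1 := by omega
  simp only [hgt, ite_true, hAmax, hidx, Option.getD_some, zero_add]

-- ===== VERDICT (by name: the statement is the Claim_ definition above) =====
theorem get_max_seq_length_spec : Claim_equal_get_max_seq_length := by
  intro data _ hpre
  obtain ⟨hne, _⟩ := hpre
  unfold Spec_get_max_seq_length get_max_seq_length get_max_seq_length_alt
  have hfold : (PySem.List.enumerate data 0).foldl
      (fun (acc : Int × Int) p =>
        if ((pvLookup p.2).length : Int) > acc.1 then (((pvLookup p.2).length : Int), p.1) else acc)
      (-1, -1) =
      (PySem.List.enumerate (data.map (fun d => ((pvLookup d).length : Int))) 0).foldl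
      (fun (acc : Int × Int) p => if p.2 > acc.1 then (p.2, p.1) else acc) (-1, -1) := by
    rw [enumerate_map (fun d => ((pvLookup d).length : Int)) data 0, List.foldl_map]
  simp only [hfold]
  exact combined_spec (data.map (fun d => ((pvLookup d).length : Int)))
    (by simp [hne]) (by intro y hy; obtain ⟨d, _, rfl⟩ := List.mem_map.mp hy; positivity)
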